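-- pv_equiv track=rewrite | github.com/jholog/challenges-py | programmers/pccp/heredity.py | find
-- ===== SOURCE A (Python) =====
-- def find(n, p):
--     p -= 1
--     stack = []
--     while n > 1:
--         stack.append(p % 4)  # 형제 사이 개체 순서
--         n -= 1
--         p //= 4  # 부모 세대의 개체 순서
--
--     while stack:
--         num = stack.pop()
--         if num == 0:
--             return "RR"
--         if num == 3:
--             return "rr"
--     return "Rr"
-- ===== SOURCE B (Python) =====
-- def find(n, p):
--     p -= 1
--     for i in range(n - 2, -1, -1):
--         digit = p // 4 ** i % 4
--         if digit == 0:
--             return "RR"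
--         if digit == 3:
--             return "rr"
--     return "Rr"
-- ===== Notes on version B (the rewrite author's own statement) =====
-- stated objective: simpler
-- what changed: B replaces A's two-pass build-a-digit-stack-then-pop with a single high-to-low positional scan that reads digit i as (p-1) // 4**i % 4 and short-circuits on the first digit equal to 0 or 3.
import Mathlib
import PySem

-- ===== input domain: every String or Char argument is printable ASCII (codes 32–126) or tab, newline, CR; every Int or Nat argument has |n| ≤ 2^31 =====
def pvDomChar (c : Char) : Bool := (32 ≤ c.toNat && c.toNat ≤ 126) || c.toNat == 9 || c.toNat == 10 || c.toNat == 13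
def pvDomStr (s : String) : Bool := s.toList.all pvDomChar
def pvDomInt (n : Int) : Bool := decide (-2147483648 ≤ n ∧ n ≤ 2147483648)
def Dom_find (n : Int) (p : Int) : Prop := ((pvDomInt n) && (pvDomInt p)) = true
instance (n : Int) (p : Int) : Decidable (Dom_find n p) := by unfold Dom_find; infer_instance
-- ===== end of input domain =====

-- B replaces A's build-stack-then-pop two-pass by a single high-to-low positional
-- base-4 digit scan that short-circuits (simpler decomposition, same cost).

-- ===== PORT A =====
-- The Python stack (append / pop both at the TAIL) is modelled head-first:
-- push = cons, pop = take the head; same pushes, same pops, same order of pops.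
-- while n > 1: stack.append(p % 4); n -= 1; p //= 4
def findStackLoop (n : Int) (p : Int) (stack : List Int) : List Int :=
  if 1 < n then
    findStackLoop (n - 1) (PySem.Int.floordiv p 4) (PySem.Int.mod p 4 :: stack)
  else stack
termination_by (n - 1).toNat
decreasing_by omega

-- while stack: num = stack.pop(); …
def findPopLoop : List Int → String
  | [] => "Rr"
  | num :: rest =>
    if num = 0 then "RR"
    else if num = 3 then "rr"
    else findPopLoop rest

def find (n : Int) (p : Int) : String :=
  findPopLoop (findStackLoop n (p - 1) [])

-- ===== PORT B =====
-- for i in range(n-2, -1, -1): digit = p // 4**i % 4; …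
def findScanLoop (q : Int) : List Int → String
  | [] => "Rr"
  | i :: rest =>
    let digit := PySem.Int.mod (PySem.Int.floordiv q ((4 : Int) ^ i.toNat)) 4
    if digit = 0 then "RR"
    else if digit = 3 then "rr"
    else findScanLoop q rest

def find_alt (n : Int) (p : Int) : String :=
  findScanLoop (p - 1) (PySem.List.pyRange (n - 2) (-1) (-1))

-- ===== PRECONDITION & SPEC =====
def Spec_find (n : Int) (p : Int) (out : String) : Prop := out = find_alt n p
instance (n : Int) (p : Int) (out : String) : Decidable (Spec_find n p out) := by unfold Spec_find; infer_instance

-- ===== CLAIM (what is proved, stated in full; the proofs are below) =====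
def Claim_equal_find : Prop := ∀ (n : Int) (p : Int), Dom_find n p → Spec_find n p (find n p)

-- ===== LEMMAS AND PROOFS =====

-- the j-th base-4 digit of q (Python floor semantics)
def digitAt (q : Int) (j : Nat) : Int :=
  PySem.Int.mod (PySem.Int.floordiv q ((4 : Int) ^ j)) 4

-- the shared scan: first digit equal to 0 gives "RR", first equal to 3 gives "rr"
def scanD : List Int → String
  | [] => "Rr"
  | x :: r => if x = 0 then "RR" else if x = 3 then "rr" else scanD r

theorem digit_zero (q : Int) : digitAt q 0 = PySem.Int.mod q 4 := by
  unfold digitAt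
  norm_num [show PySem.Int.floordiv q 1 = Int.fdiv q 1 from rfl, Int.fdiv_one]

theorem digit_shift (q : Int) (j : Nat) :
    digitAt (PySem.Int.floordiv q 4) j = digitAt q (j + 1) := by
  unfold digitAt
  have : PySem.Int.floordiv (PySem.Int.floordiv q 4) ((4 : Int) ^ j)
      = PySem.Int.floordiv q ((4 : Int) ^ (j + 1)) := by
    show (q.fdiv 4).fdiv _ = q.fdiv _
    rw [Int.fdiv_fdiv_eq_fdiv_mul q (by norm_num) (by positivity)]
    congr 1; ring
  rw [this]

theorem stack_eq (k : Nat) : ∀ (n p : Int) (acc : List Int), (n - 1).toNat = k →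
    findStackLoop n p acc = ((List.range k).map (digitAt p)).reverse ++ acc := by
  induction k with
  | zero =>
    intro n p acc h
    rw [findStackLoop]
    simp [show ¬(1 : Int) < n by omega]
  | succ k ih =>
    intro n p acc h
    have hn : (1 : Int) < n := by omega
    rw [findStackLoop, if_pos hn, ih (n - 1) _ _ (by omega)]
    have hmap : (List.range k).map (digitAt (PySem.Int.floordiv p 4))
        = (List.range k).map (fun j => digitAt p (j + 1)) := by
      apply List.map_congr_left
      intro j _
      exact digit_shift p j
    rw [hmap, List.range_succ_eq_map]
    simp [List.map_map, digit_zero, Function.comp_def]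

theorem pop_eq (st : List Int) : findPopLoop st = scanD st := by
  induction st with
  | nil => rfl
  | cons x xs ih => simp [findPopLoop, scanD, ih]

theorem scan_loop_eq (q : Int) (l : List Int) :
    findScanLoop q l = scanD (l.map (fun i => digitAt q i.toNat)) := by
  induction l with
  | nil => rfl
  | cons i r ih => simp [findScanLoop, scanD, digitAt, ih]

theorem A_char (n p : Int) :
    find n p = scanD (((List.range (n - 1).toNat).map (digitAt (p - 1))).reverse) := by
  unfold find
  rw [stack_eq (n - 1).toNat n (p - 1) [] rfl, pop_eq]
  simp

theorem find_eq_alt (n p : Int) : find n p = find_alt n p := by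
  rw [A_char]
  unfold find_alt
  rw [scan_loop_eq, PySem.List.pyRange_neg_one]
  congr 1
  have hlen : (n - 2 - (-1)).toNat = (n - 1).toNat := by omega
  rw [hlen, List.map_map, ← List.map_reverse]
  rw [List.range_eq_range', List.reverse_range', ← List.range_eq_range']
  rw [List.map_map]
  apply List.map_congr_left
  intro j hj
  have hjk : j < (n - 1).toNat := by simpa using hj
  simp only [Function.comp_apply]
  congr 1
  omega

-- ===== VERDICT (by name: the statement is the Claim_ definition above) =====
theorem find_spec : Claim_equal_find := by
  intro n p _
  unfold Spec_find
  exact find_eq_alt n p
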